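-- pv_equiv track=rewrite | github.com/FOI-Bioinformatics/neoswga | neoswga/core/filter.py | _has_dinucleotide_repeats
-- ===== SOURCE A (Python) =====
-- from collections import Counter
--
-- DINUCLEOTIDE_REPEAT_PATTERNS = (
--     'ATATATATAT', 'TATATATATA',  # AT repeats
--     'AGAGAGAGAG', 'GAGAGAGAGA',  # AG repeats
--     'ACACACACAC', 'CACACACACA',  # AC repeats
--     'TCTCTCTCTC', 'CTCTCTCTCT',  # TC repeats
--     'GTGTGTGTGT', 'TGTGTGTGTG',  # GT repeats
--     'CGCGCGCGCG', 'GCGCGCGCGC',  # CG repeats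
-- )
--
-- MIN_LENGTH_FOR_DINUCLEOTIDE_CHECK = 10
--
-- MIN_NUCLEOTIDE_COUNT_FOR_REPEAT = 5
--
-- def _has_dinucleotide_repeats(primer: str, nucleotide_counts: Counter[str]) -> bool:
--     """
--     Check if primer contains problematic dinucleotide repeats.
--
--     Only checks if primer is long enough and has sufficient counts of
--     the nucleotides involved in each repeat pattern.
--     """
--     if len(primer) < MIN_LENGTH_FOR_DINUCLEOTIDE_CHECK:
--         return False
--
--     # Find nucleotides with high counts (potential repeat participants)
--     high_count_nucleotides = {
--         nucleo for nucleo, count in nucleotide_counts.items()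
--         if count >= MIN_NUCLEOTIDE_COUNT_FOR_REPEAT
--     }
--
--     # Only check if at least 2 nucleotides have high counts
--     if len(high_count_nucleotides) < 2:
--         return False
--
--     # Check each pattern
--     for pattern in DINUCLEOTIDE_REPEAT_PATTERNS:
--         if pattern in primer:
--             return True
--
--     return False
-- ===== SOURCE B (Python) =====
-- from collections import Counter
--
-- MIN_LENGTH_FOR_DINUCLEOTIDE_CHECK = 10
-- MIN_NUCLEOTIDE_COUNT_FOR_REPEAT = 5
--
--
-- def _has_dinucleotide_repeats(primer: str, nucleotide_counts: Counter) -> bool: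
--     if len(primer) < MIN_LENGTH_FOR_DINUCLEOTIDE_CHECK:
--         return False
--
--     high_count_nucleotides = {
--         nucleo for nucleo, count in nucleotide_counts.items()
--         if count >= MIN_NUCLEOTIDE_COUNT_FOR_REPEAT
--     }
--     if len(high_count_nucleotides) < 2:
--         return False
--
--     # Slide a length-10 window; a hit is an alternating run of two distinct
--     # ACGT bases, which is exactly one of the 12 fixed patterns.
--     for i in range(len(primer) - 9):
--         a, b = primer[i], primer[i + 1]
--         if a != b and a in 'ACGT' and b in 'ACGT' and primer[i:i + 10] == (a + b) * 5:
--             return True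
--     return False
-- ===== Notes on version B (the rewrite author's own statement) =====
-- stated objective: idiomatic
-- what changed: The 12-hardcoded-pattern substring search is replaced by a single sliding length-10 window that derives the alternating dinucleotide (two distinct ACGT bases) from the window itself.
import Mathlib
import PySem

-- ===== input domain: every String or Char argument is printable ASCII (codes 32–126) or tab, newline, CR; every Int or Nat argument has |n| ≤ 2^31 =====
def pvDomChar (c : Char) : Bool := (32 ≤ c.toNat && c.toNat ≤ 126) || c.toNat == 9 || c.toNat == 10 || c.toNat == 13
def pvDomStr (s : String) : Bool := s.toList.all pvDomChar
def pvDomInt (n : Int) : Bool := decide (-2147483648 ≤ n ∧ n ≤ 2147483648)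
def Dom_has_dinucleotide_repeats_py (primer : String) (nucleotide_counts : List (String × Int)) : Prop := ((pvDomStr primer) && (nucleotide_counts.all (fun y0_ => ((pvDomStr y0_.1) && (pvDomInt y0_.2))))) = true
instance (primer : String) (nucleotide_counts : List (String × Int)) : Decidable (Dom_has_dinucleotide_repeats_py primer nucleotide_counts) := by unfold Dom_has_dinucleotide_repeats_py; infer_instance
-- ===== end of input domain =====

-- ===== PORT A =====
-- B changes only the pattern search: a sliding length-10 window deriving the alternating
-- dinucleotide from its first two characters, instead of matching 12 hardcoded patterns (idiomatic).
def pvPatterns : List (List Char) :=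
  [ ['A','T','A','T','A','T','A','T','A','T'], ['T','A','T','A','T','A','T','A','T','A'],
    ['A','G','A','G','A','G','A','G','A','G'], ['G','A','G','A','G','A','G','A','G','A'],
    ['A','C','A','C','A','C','A','C','A','C'], ['C','A','C','A','C','A','C','A','C','A'],
    ['T','C','T','C','T','C','T','C','T','C'], ['C','T','C','T','C','T','C','T','C','T'],
    ['G','T','G','T','G','T','G','T','G','T'], ['T','G','T','G','T','G','T','G','T','G'],
    ['C','G','C','G','C','G','C','G','C','G'], ['G','C','G','C','G','C','G','C','G','C'] ]

def has_dinucleotide_repeats_py (primer : String) (nucleotide_counts : List (String × Int)) : Bool :=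
  if PySem.Str.len primer < 10 then false
  else
    let high : PySem.Set String :=
      nucleotide_counts.foldl
        (fun s p => if 5 ≤ p.2 then PySem.Set.add s p.1 else s) PySem.Set.empty
    if high.length < 2 then false
    else pvPatterns.any (fun pat => PySem.Chars.isIn pat primer.toList)

-- ===== PORT B =====
-- window test at index i: first two chars distinct, both ACGT, window = their 5-fold alternation
def pvWindowOk (s : List Char) (i : Nat) : Bool :=
  let w := (s.drop i).take 10
  match w with
  | a :: b :: _ =>
      (a != b) && (['A','C','G','T'].contains a) && (['A','C','G','T'].contains b) &&
        (w == [a, b, a, b, a, b, a, b, a, b])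
  | _ => false

def has_dinucleotide_repeats_py_alt (primer : String) (nucleotide_counts : List (String × Int)) : Bool :=
  if PySem.Str.len primer < 10 then false
  else
    let high : PySem.Set String :=
      nucleotide_counts.foldl
        (fun s p => if 5 ≤ p.2 then PySem.Set.add s p.1 else s) PySem.Set.empty
    if high.length < 2 then false
    else (List.range (primer.toList.length - 9)).any (fun i => pvWindowOk primer.toList i)

-- ===== PRECONDITION & SPEC =====
def Spec_has_dinucleotide_repeats_py (primer : String) (nucleotide_counts : List (String × Int)) (out : Bool) : Prop := out = has_dinucleotide_repeats_py_alt primer nucleotide_counts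
instance (primer : String) (nucleotide_counts : List (String × Int)) (out : Bool) : Decidable (Spec_has_dinucleotide_repeats_py primer nucleotide_counts out) := by unfold Spec_has_dinucleotide_repeats_py; infer_instance

-- ===== CLAIM (what is proved, stated in full; the proofs are below) =====
def Claim_equal_has_dinucleotide_repeats_py : Prop := ∀ (primer : String) (nucleotide_counts : List (String × Int)), Dom_has_dinucleotide_repeats_py primer nucleotide_counts → Spec_has_dinucleotide_repeats_py primer nucleotide_counts (has_dinucleotide_repeats_py primer nucleotide_counts)

-- ===== LEMMAS AND PROOFS =====

-- every fixed pattern is the 5-fold alternation of two distinct ACGT bases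
lemma pvPat_shape (p : List Char) (hp : p ∈ pvPatterns) :
    ∃ a b : Char, p = [a, b, a, b, a, b, a, b, a, b] ∧
      a ∈ (['A','C','G','T'] : List Char) ∧ b ∈ (['A','C','G','T'] : List Char) ∧ a ≠ b := by
  simp only [pvPatterns, List.mem_cons, List.not_mem_nil, or_false] at hp
  rcases hp with rfl|rfl|rfl|rfl|rfl|rfl|rfl|rfl|rfl|rfl|rfl|rfl <;>
    exact ⟨_, _, rfl, by decide, by decide, by decide⟩

-- conversely the alternation of two distinct ACGT bases is one of the 12 patterns
lemma pvPat_mem (a b : Char) (ha : a ∈ (['A','C','G','T'] : List Char))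
    (hb : b ∈ (['A','C','G','T'] : List Char)) (hne : a ≠ b) :
    [a, b, a, b, a, b, a, b, a, b] ∈ pvPatterns := by
  fin_cases ha <;> fin_cases hb <;> first
    | exact absurd rfl hne
    | decide

lemma pvWindowOk_of_take (s : List Char) (j : Nat) (a b : Char)
    (h : (s.drop j).take 10 = [a, b, a, b, a, b, a, b, a, b])
    (ha : a ∈ (['A','C','G','T'] : List Char)) (hb : b ∈ (['A','C','G','T'] : List Char))
    (hne : a ≠ b) : pvWindowOk s j = true := by
  simp only [pvWindowOk, h]
  simp [hne, ha, hb]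

-- the 12-pattern substring search equals the sliding-window scan
lemma pvCore (s : List Char) :
    pvPatterns.any (fun pat => PySem.Chars.isIn pat s) =
      (List.range (s.length - 9)).any (fun i => pvWindowOk s i) := by
  rw [Bool.eq_iff_iff]
  simp only [List.any_eq_true, List.mem_range]
  constructor
  · rintro ⟨p, hp, hin⟩
    obtain ⟨a, b, rfl, ha, hb, hne⟩ := pvPat_shape p hp
    obtain ⟨j, hj⟩ := (PySem.Chars.exists_prefix_drop_iff_isIn _ _).2 hin
    have hlen : (10 : Nat) ≤ (s.drop j).length := by
      have := hj.length_le; simpa using this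
    have htake : (s.drop j).take 10 = [a, b, a, b, a, b, a, b, a, b] := by
      have := (List.prefix_iff_eq_take.1 hj)
      simpa using this.symm
    refine ⟨j, ?_, pvWindowOk_of_take s j a b htake ha hb hne⟩
    have : (s.drop j).length = s.length - j := List.length_drop
    omega
  · rintro ⟨i, hi, hok⟩
    simp only [pvWindowOk] at hok
    rcases h10 : (s.drop i).take 10 with _ | ⟨a, _ | ⟨b, rest⟩⟩ <;> rw [h10] at hok
    · exact absurd hok (by simp)
    · exact absurd hok (by simp)
    · simp only [Bool.and_eq_true, bne_iff_ne, ne_eq, List.contains_eq_mem,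
        decide_eq_true_eq, beq_iff_eq] at hok
      obtain ⟨⟨⟨hne, ha⟩, hb⟩, heq⟩ := hok
      refine ⟨[a, b, a, b, a, b, a, b, a, b], pvPat_mem a b ha hb hne, ?_⟩
      refine (PySem.Chars.exists_prefix_drop_iff_isIn _ _).1 ⟨i, ?_⟩
      rw [← heq, ← h10]
      exact List.take_prefix _ _

-- ===== VERDICT (by name: the statement is the Claim_ definition above) =====
theorem has_dinucleotide_repeats_py_spec : Claim_equal_has_dinucleotide_repeats_py := by
  intro primer nucleotide_counts _
  unfold Spec_has_dinucleotide_repeats_py has_dinucleotide_repeats_py has_dinucleotide_repeats_py_alt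
  rw [pvCore]
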